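-- pv_equiv track=rewrite | github.com/Soohan-Park/Practice-CT-2020 | Week04/DFS&BFS) 단어 변환.py | solution
-- ===== SOURCE A (Python) =====
-- def solution(begin, target, words):
--     if target not in words:  # 변환할 수 없는 경우 (target이 words에 없으면 변환할 수 없다)
--         return 0
--     else:
--         stackA = [ begin ]
--         stackB = []
--
--         count = 0
--         while True:
--             count += 1
--             for a in stackA:
--                 for w in words:
--                     if a != w:
--                         cntDiff = 0
--                         for i in range(len(a)):  # len(a) == len(w)
--                             if a[i] != w[i]:
--                                 cntDiff += 1
--
--                                 if cntDiff >= 2: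
--                                     break
--
--                         if cntDiff == 1:
--                             stackB.append(w)
--
--             if target in stackB:
--                 return count
--
--             stackA = stackB
--             stackB = []
-- ===== SOURCE B (Python) =====
-- def solution(begin, target, words):
--     if target not in words:
--         return 0
--
--     def near(u, w):
--         return len(u) == len(w) and sum(c != d for c, d in zip(u, w)) == 1
--
--     visited = [begin]
--     frontier = [begin]
--     dist = 0
--     while frontier:
--         dist += 1
--         nxt = []
--         for w in words:
--             if w not in visited and w not in nxt and any(near(u, w) for u in frontier):
--                 nxt.append(w)
--         if target in nxt:
--             return dist
--         visited += nxt
--         frontier = nxt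
--     return 0
-- ===== Notes on version B (the rewrite author's own statement) =====
-- stated objective: alternative
-- what changed: replaces A's visited-less level expansion (frontier lists that can grow multiplicatively and re-scan the whole word list per element, with a hand-rolled per-char diff loop) by a standard BFS with a visited list, so each word enters a frontier at most once and the loop always terminates
-- outside the precondition, e.g. on solution('ab', 'axc', ['axc']): A returns 1, B returns 0; on solution('aa', 'aa', ['aa', 'ab']): A returns 2, B returns 0; on solution('ab', 'zz', ['zz']): A does not finish within the time limit, B returns 0
import Mathlib
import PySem

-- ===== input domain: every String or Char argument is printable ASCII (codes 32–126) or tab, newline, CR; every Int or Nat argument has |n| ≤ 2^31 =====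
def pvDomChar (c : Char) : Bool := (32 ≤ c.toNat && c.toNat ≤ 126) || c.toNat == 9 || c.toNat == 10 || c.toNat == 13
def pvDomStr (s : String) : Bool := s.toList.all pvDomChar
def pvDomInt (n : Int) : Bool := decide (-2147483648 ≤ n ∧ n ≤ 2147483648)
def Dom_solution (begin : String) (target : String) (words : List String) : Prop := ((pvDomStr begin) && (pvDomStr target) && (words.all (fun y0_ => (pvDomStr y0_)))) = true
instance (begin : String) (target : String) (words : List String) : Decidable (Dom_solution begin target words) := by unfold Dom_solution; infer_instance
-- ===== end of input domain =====

-- B is a standard BFS with a visited list: each word enters a frontier at most once,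
-- where A re-expands unpruned frontiers and loops forever when the target is in words
-- but unreachable; return values agree on Pre_.

-- ===== PORT A =====
-- inner `for i in range(len(a))` loop of A: counts differing positions, breaking once the
-- count reaches 2.  When w is shorter than a, Python raises IndexError (excluded by Pre_);
-- here the recursion just stops.
def pvCntDiff : List Char → List Char → Nat → Nat
  | [], _, cnt => cnt
  | _ :: _, [], cnt => cnt
  | x :: xs, y :: ys, cnt =>
    if x ≠ y then
      if cnt + 1 ≥ 2 then cnt + 1
      else pvCntDiff xs ys (cnt + 1)
    else pvCntDiff xs ys cnt

-- the two nested `for a in stackA: for w in words:` loops building stackB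
def pvStepA (words : List String) (stackA : List String) : List String :=
  stackA.foldl (fun stackB a =>
    words.foldl (fun stackB w =>
      if a ≠ w ∧ pvCntDiff a.toList w.toList 0 = 1 then stackB ++ [w] else stackB) stackB) []

-- A's `while True:` loop; ported with fuel (words.length suffices on Pre_: the level at
-- which the target first appears is the length of a repetition-free transformation chain)
def pvLoopA (target : String) (words : List String) (stackA : List String) (count : Int) : Nat → Int
  | 0 => 0   -- fuel exhaustion: unreachable under Pre_solution
  | fuel + 1 =>
    let count := count + 1
    let stackB := pvStepA words stackA
    if target ∈ stackB then count
    else pvLoopA target words stackB count fuel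

def solution (begin : String) (target : String) (words : List String) : Int :=
  if target ∉ words then 0
  else pvLoopA target words [begin] 0 words.length

-- ===== PORT B =====
-- near(u, w) of Source B: same length and exactly one differing position
def pvNear (u w : String) : Bool :=
  u.toList.length == w.toList.length &&
    (u.toList.zip w.toList).countP (fun p => p.1 != p.2) == 1

-- the `for w in words:` loop of Source B building nxt (distinct, not yet visited)
def pvStepB (words visited frontier : List String) : List String :=
  words.foldl (fun nxt w =>
    if w ∉ visited ∧ w ∉ nxt ∧ frontier.any (fun u => pvNear u w) then nxt ++ [w] else nxt) []

-- Source B's `while frontier:` loop; fuel words.length + 1 suffices on Pre_ (visited grows)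
def pvLoopB (target : String) (words : List String) (visited frontier : List String) (dist : Int) : Nat → Int
  | 0 => 0   -- fuel exhaustion: unreachable under Pre_solution
  | fuel + 1 =>
    if frontier = [] then 0
    else
      let dist := dist + 1
      let nxt := pvStepB words visited frontier
      if target ∈ nxt then dist
      else pvLoopB target words (visited ++ nxt) nxt dist fuel

def solution_alt (begin : String) (target : String) (words : List String) : Int :=
  if target ∉ words then 0
  else pvLoopB target words [begin] [begin] 0 (words.length + 1)

-- ===== PRECONDITION & SPEC =====
-- Pre_'s own copy of the one-letter-apart adjacency (so Pre_ reaches neither port)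
def pvAdj (u w : String) : Bool :=
  u.toList.length == w.toList.length &&
    (u.toList.zip w.toList).countP (fun p => p.1 != p.2) == 1

-- pvLevels begin words k = the words reachable by some transformation walk of length exactly k
def pvLevels (begin : String) (words : List String) : Nat → List String
  | 0 => [begin]
  | k + 1 => words.filter (fun w => (pvLevels begin words k).any (fun u => pvAdj u w))

-- Pre_ excludes, when target ∈ words: word lists with a word of another length than begin
-- (A compares only the first len(begin) characters and raises IndexError on shorter words),
-- target = begin (A counts a round trip there, a corner the problem leaves unspecified),
-- and unreachable targets (A loops forever).  When target ∉ words both return 0 and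
-- nothing is required.
def Pre_solution (begin : String) (target : String) (words : List String) : Prop :=
  target ∈ words →
    begin ≠ target ∧ (∀ w ∈ words, w.toList.length = begin.toList.length) ∧
    ∃ k < words.length, target ∈ pvLevels begin words (k + 1)

instance (begin : String) (target : String) (words : List String) : Decidable (Pre_solution begin target words) := by
  unfold Pre_solution; infer_instance

def pvWitness_solution : String × String × List String := ("ab", "bb", ["bb"])

def Spec_solution (begin : String) (target : String) (words : List String) (out : Int) : Prop := out = solution_alt begin target words
instance (begin : String) (target : String) (words : List String) (out : Int) : Decidable (Spec_solution begin target words out) := by unfold Spec_solution; infer_instance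

-- ===== CLAIM (what is proved, stated in full; the proofs are below) =====
def Claim_equal_solution : Prop := ∀ (begin : String) (target : String) (words : List String), Dom_solution begin target words → Pre_solution begin target words → Spec_solution begin target words (solution begin target words)

-- ===== LEMMAS AND PROOFS =====

theorem pvCntDiff_eq (xs ys : List Char) (c : Nat) (hc : c < 2) :
    pvCntDiff xs ys c = min (c + (xs.zip ys).countP (fun p => p.1 != p.2)) 2 := by
  induction xs generalizing ys c with
  | nil => simp [pvCntDiff]; omega
  | cons x xs ih =>
    cases ys with
    | nil => simp [pvCntDiff]; omega
    | cons y ys =>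
      simp only [pvCntDiff, List.zip_cons_cons, List.countP_cons]
      by_cases hxy : x = y
      · simp only [hxy, if_neg (by simp : ¬ (y ≠ y))]
        rw [ih _ _ hc]; simp
      · rw [if_pos hxy]
        by_cases hc1 : c + 1 ≥ 2
        · rw [if_pos hc1]; simp [hxy]; omega
        · rw [if_neg hc1, ih _ _ (by omega)]; simp [hxy]; omega

theorem zip_self_eq {α : Type} (xs : List α) (p : α × α) (hp : p ∈ xs.zip xs) : p.1 = p.2 := by
  induction xs with
  | nil => simp at hp
  | cons x xs ih =>
    rw [List.zip_cons_cons, List.mem_cons] at hp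
    rcases hp with h | h
    · subst h; rfl
    · exact ih h

-- A's neighbour test agrees with pvAdj on same-length strings
theorem condA_iff_adj (a w : String) (h : a.toList.length = w.toList.length) :
    (a ≠ w ∧ pvCntDiff a.toList w.toList 0 = 1) ↔ pvAdj a w = true := by
  rw [pvCntDiff_eq _ _ 0 (by omega)]
  unfold pvAdj
  simp only [Bool.and_eq_true, beq_iff_eq]
  constructor
  · rintro ⟨-, hcnt⟩
    refine ⟨h, ?_⟩; omega
  · rintro ⟨-, hcnt⟩
    refine ⟨?_, by omega⟩
    intro heq
    have h1 : (a.toList.zip w.toList).countP (fun p => p.1 != p.2) = 1 := by omega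
    have hpos : 0 < (a.toList.zip w.toList).countP (fun p => p.1 != p.2) := by omega
    rw [List.countP_pos_iff] at hpos
    obtain ⟨p, hp, hne⟩ := hpos
    rw [heq] at hp
    have := zip_self_eq w.toList p (by simpa using hp)
    simp [this] at hne

theorem mem_foldl_if {α : Type} [DecidableEq α] (cond : α → Prop) [DecidablePred cond]
    (ws : List α) (init : List α) (x : α) :
    x ∈ ws.foldl (fun acc w => if cond w then acc ++ [w] else acc) init ↔
      x ∈ init ∨ (x ∈ ws ∧ cond x) := by
  induction ws generalizing init with
  | nil => simp
  | cons w ws ih =>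
    simp only [List.foldl_cons, ih, List.mem_cons]
    by_cases hw : cond w
    · simp only [if_pos hw, List.mem_append, List.mem_singleton]
      constructor
      · rintro ((h | h) | h)
        · exact Or.inl h
        · exact Or.inr ⟨Or.inl h, h ▸ hw⟩
        · exact Or.inr ⟨Or.inr h.1, h.2⟩
      · rintro (h | ⟨(h | h), hc⟩)
        · exact Or.inl (Or.inl h)
        · exact Or.inl (Or.inr h)
        · exact Or.inr ⟨h, hc⟩
    · simp only [if_neg hw]
      constructor
      · rintro (h | h)
        · exact Or.inl h
        · exact Or.inr ⟨Or.inr h.1, h.2⟩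
      · rintro (h | ⟨(h | h), hc⟩)
        · exact Or.inl h
        · exact absurd (h ▸ hc) hw
        · exact Or.inr ⟨h, hc⟩

theorem mem_pvStepA (words S : List String) (x : String) :
    x ∈ pvStepA words S ↔
      x ∈ words ∧ ∃ a ∈ S, a ≠ x ∧ pvCntDiff a.toList x.toList 0 = 1 := by
  unfold pvStepA
  suffices h : ∀ init : List String,
      x ∈ S.foldl (fun stackB a =>
        words.foldl (fun stackB w =>
          if a ≠ w ∧ pvCntDiff a.toList w.toList 0 = 1 then stackB ++ [w] else stackB) stackB) init ↔
      x ∈ init ∨ (x ∈ words ∧ ∃ a ∈ S, a ≠ x ∧ pvCntDiff a.toList x.toList 0 = 1) by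
    rw [h []]; simp
  induction S with
  | nil => simp
  | cons a S ih =>
    intro init
    simp only [List.foldl_cons, ih, mem_foldl_if (fun w => a ≠ w ∧ pvCntDiff a.toList w.toList 0 = 1) words init x]
    constructor
    · rintro ((h | h) | h)
      · exact Or.inl h
      · exact Or.inr ⟨h.1, a, List.mem_cons_self .., h.2⟩
      · obtain ⟨hx, b, hb, hc⟩ := h
        exact Or.inr ⟨hx, b, List.mem_cons_of_mem _ hb, hc⟩
    · rintro (h | ⟨hx, b, hb, hc⟩)
      · exact Or.inl (Or.inl h)
      · rcases List.mem_cons.mp hb with rfl | hb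
        · exact Or.inl (Or.inr ⟨hx, hc⟩)
        · exact Or.inr ⟨hx, b, hb, hc⟩

theorem mem_foldl_if_nodup {α : Type} [DecidableEq α] (c1 c2 : α → Prop)
    [DecidablePred c1] [DecidablePred c2] (ws : List α) (init : List α) (x : α) :
    x ∈ ws.foldl (fun acc w => if c1 w ∧ w ∉ acc ∧ c2 w then acc ++ [w] else acc) init ↔
      x ∈ init ∨ (x ∈ ws ∧ c1 x ∧ c2 x) := by
  induction ws generalizing init with
  | nil => simp
  | cons w ws ih =>
    simp only [List.foldl_cons, ih, List.mem_cons]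
    by_cases hw : c1 w ∧ w ∉ init ∧ c2 w
    · simp only [if_pos hw, List.mem_append, List.mem_singleton]
      constructor
      · rintro ((h | h) | h)
        · exact Or.inl h
        · exact Or.inr ⟨Or.inl h, h ▸ hw.1, h ▸ hw.2.2⟩
        · exact Or.inr ⟨Or.inr h.1, h.2⟩
      · rintro (h | ⟨(h | h), hc⟩)
        · exact Or.inl (Or.inl h)
        · exact Or.inl (Or.inr h)
        · exact Or.inr ⟨h, hc⟩
    · simp only [if_neg hw]
      constructor
      · rintro (h | h)
        · exact Or.inl h
        · exact Or.inr ⟨Or.inr h.1, h.2⟩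
      · rintro (h | ⟨(h | h), hc1, hc2⟩)
        · exact Or.inl h
        · subst h
          by_cases hin : x ∈ init
          · exact Or.inl hin
          · exact absurd ⟨hc1, hin, hc2⟩ hw
        · exact Or.inr ⟨h, hc1, hc2⟩

theorem mem_pvStepB (words V F : List String) (x : String) :
    x ∈ pvStepB words V F ↔ x ∈ words ∧ x ∉ V ∧ ∃ u ∈ F, pvNear u x = true := by
  unfold pvStepB
  rw [mem_foldl_if_nodup (fun w => w ∉ V) (fun w => F.any (fun u => pvNear u w) = true) words [] x]
  simp [List.any_eq_true]

theorem mem_pvLevels_succ (begin : String) (words : List String) (k : Nat) (w : String) :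
    w ∈ pvLevels begin words (k + 1) ↔
      w ∈ words ∧ ∃ u ∈ pvLevels begin words k, pvAdj u w = true := by
  simp [pvLevels, List.mem_filter, List.any_eq_true]

theorem pvLevels_length (begin : String) (words : List String)
    (hw : ∀ w ∈ words, w.toList.length = begin.toList.length) (k : Nat) (w : String)
    (h : w ∈ pvLevels begin words k) : w.toList.length = begin.toList.length := by
  cases k with
  | zero => simp [pvLevels] at h; subst h; rfl
  | succ k =>
    rw [mem_pvLevels_succ] at h
    exact hw w h.1

-- existence of the minimal level of a member
theorem exists_min_level (begin : String) (words : List String) (u : String) :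
    ∀ k, u ∈ pvLevels begin words k →
      ∃ m ≤ k, u ∈ pvLevels begin words m ∧ ∀ j < m, u ∉ pvLevels begin words j := by
  intro k
  induction k using Nat.strong_induction_on with
  | _ k ih =>
    intro hk
    by_cases hall : ∀ j < k, u ∉ pvLevels begin words j
    · exact ⟨k, le_refl k, hk, hall⟩
    · push Not at hall
      obtain ⟨j, hj, hmem⟩ := hall
      obtain ⟨m, hm, h1, h2⟩ := ih j hj hmem
      exact ⟨m, le_of_lt (lt_of_le_of_lt hm hj), h1, h2⟩

-- every level up to a minimal-level d is someone's minimal level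
theorem exists_frontier (begin : String) (words : List String) (t : String) (d : Nat)
    (hd : t ∈ pvLevels begin words d) (hmin : ∀ j < d, t ∉ pvLevels begin words j) :
    ∀ k ≤ d, ∃ u, u ∈ pvLevels begin words k ∧ ∀ j < k, u ∉ pvLevels begin words j := by
  suffices h : ∀ i, i ≤ d → ∃ u, u ∈ pvLevels begin words (d - i) ∧ ∀ j < d - i, u ∉ pvLevels begin words j by
    intro k hk
    obtain ⟨u, h1, h2⟩ := h (d - k) (Nat.sub_le ..)
    rw [Nat.sub_sub_self hk] at h1 h2
    exact ⟨u, h1, h2⟩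
  intro i
  induction i with
  | zero => intro _; exact ⟨t, by simpa using hd, by simpa using hmin⟩
  | succ i ih =>
    intro hi
    obtain ⟨u, hu, humin⟩ := ih (le_of_lt (by omega))
    have hdi : d - i = (d - (i + 1)) + 1 := by omega
    rw [hdi, mem_pvLevels_succ] at hu
    obtain ⟨huw, v, hv, hadj⟩ := hu
    refine ⟨v, hv, fun j hj hvj => ?_⟩
    have : u ∈ pvLevels begin words (j + 1) := by
      rw [mem_pvLevels_succ]
      exact ⟨huw, v, hvj, hadj⟩
    exact humin (j + 1) (by omega) this

theorem loopA_eq (begin target : String) (words : List String)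
    (hw : ∀ w ∈ words, w.toList.length = begin.toList.length) (d : Nat)
    (hdmem : target ∈ pvLevels begin words d)
    (hdmin : ∀ j < d, target ∉ pvLevels begin words j) :
    ∀ fuel k S, (∀ w, w ∈ S ↔ w ∈ pvLevels begin words k) → k < d → d ≤ k + fuel →
      pvLoopA target words S (k : Int) fuel = (d : Int) := by
  intro fuel
  induction fuel with
  | zero => intro k S _ hkd hdf; omega
  | succ f ih =>
    intro k S hS hkd hdf
    have hmemB : ∀ w, w ∈ pvStepA words S ↔ w ∈ pvLevels begin words (k + 1) := by
      intro w
      rw [mem_pvStepA, mem_pvLevels_succ]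
      constructor
      · rintro ⟨hwm, a, haS, hcond⟩
        refine ⟨hwm, a, (hS a).mp haS, ?_⟩
        have hlen : a.toList.length = w.toList.length := by
          rw [pvLevels_length begin words hw k a ((hS a).mp haS), hw w hwm]
        exact (condA_iff_adj a w hlen).mp hcond
      · rintro ⟨hwm, u, hu, hadj⟩
        refine ⟨hwm, u, (hS u).mpr hu, ?_⟩
        have hlen : u.toList.length = w.toList.length := by
          rw [pvLevels_length begin words hw k u hu, hw w hwm]
        exact (condA_iff_adj u w hlen).mpr hadj
    simp only [pvLoopA]
    by_cases hfound : target ∈ pvStepA words S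
    · rw [if_pos hfound]
      have hmem : target ∈ pvLevels begin words (k + 1) := (hmemB target).mp hfound
      have hk1 : k + 1 = d := by
        by_contra hne
        exact hdmin (k + 1) (by omega) hmem
      omega
    · rw [if_neg hfound]
      have hne : k + 1 ≠ d := fun h => hfound ((hmemB target).mpr (h ▸ hdmem))
      have hres := ih (k + 1) (pvStepA words S) hmemB (by omega) (by omega)
      rw [← hres]
      norm_num

theorem loopB_eq (begin target : String) (words : List String) (d : Nat)
    (hdmem : target ∈ pvLevels begin words d)
    (hdmin : ∀ j < d, target ∉ pvLevels begin words j) :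
    ∀ fuel k V F,
      (∀ w, w ∈ V ↔ ∃ j ≤ k, w ∈ pvLevels begin words j) →
      (∀ w, w ∈ F ↔ (w ∈ pvLevels begin words k ∧ ∀ j < k, w ∉ pvLevels begin words j)) →
      k < d → d ≤ k + fuel →
      pvLoopB target words V F (k : Int) fuel = (d : Int) := by
  intro fuel
  induction fuel with
  | zero => intro k V F _ _ hkd hdf; omega
  | succ f ih =>
    intro k V F hV hF hkd hdf
    have hFne : F ≠ [] := by
      obtain ⟨u, hu1, hu2⟩ := exists_frontier begin words target d hdmem hdmin k (le_of_lt hkd)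
      exact List.ne_nil_of_mem ((hF u).mpr ⟨hu1, hu2⟩)
    have hnxt : ∀ w, w ∈ pvStepB words V F ↔
        (w ∈ pvLevels begin words (k + 1) ∧ ∀ j < k + 1, w ∉ pvLevels begin words j) := by
      intro w
      rw [mem_pvStepB]
      constructor
      · rintro ⟨hwm, hwV, u, huF, hnear⟩
        obtain ⟨hu1, _⟩ := (hF u).mp huF
        refine ⟨?_, fun j hj hwj => hwV ((hV w).mpr ⟨j, by omega, hwj⟩)⟩
        rw [mem_pvLevels_succ]
        exact ⟨hwm, u, hu1, hnear⟩
      · rintro ⟨hwmem, hwmin⟩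
        have hws := hwmem
        rw [mem_pvLevels_succ] at hws
        obtain ⟨hwm, u, hu, hadj⟩ := hws
        obtain ⟨m, hm, hum, humin⟩ := exists_min_level begin words u k hu
        have hmk : m = k := by
          by_contra hne
          exact hwmin (m + 1) (by omega)
            ((mem_pvLevels_succ begin words m w).mpr ⟨hwm, u, hum, hadj⟩)
        refine ⟨hwm, fun hwV => ?_, u, (hF u).mpr ⟨hmk ▸ hum, hmk ▸ humin⟩, hadj⟩
        obtain ⟨j, hj, hwj⟩ := (hV w).mp hwV
        exact hwmin j (by omega) hwj
    simp only [pvLoopB]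
    rw [if_neg hFne]
    by_cases hfound : target ∈ pvStepB words V F
    · rw [if_pos hfound]
      have hmem := ((hnxt target).mp hfound).1
      have hk1 : k + 1 = d := by
        by_contra hne
        exact hdmin (k + 1) (by omega) hmem
      omega
    · rw [if_neg hfound]
      have hne : k + 1 ≠ d := by
        intro h
        exact hfound ((hnxt target).mpr ⟨h ▸ hdmem, fun j hj => hdmin j (by omega)⟩)
      have hV' : ∀ w, w ∈ V ++ pvStepB words V F ↔ ∃ j ≤ k + 1, w ∈ pvLevels begin words j := by
        intro w
        rw [List.mem_append, hV w, hnxt w]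
        constructor
        · rintro (⟨j, hj, hwj⟩ | ⟨hwm, _⟩)
          · exact ⟨j, by omega, hwj⟩
          · exact ⟨k + 1, le_refl _, hwm⟩
        · rintro ⟨j, hj, hwj⟩
          by_cases hjk : j ≤ k
          · exact Or.inl ⟨j, hjk, hwj⟩
          · have hj1 : j = k + 1 := by omega
            subst hj1
            by_cases hlow : ∃ i ≤ k, w ∈ pvLevels begin words i
            · exact Or.inl hlow
            · push Not at hlow
              exact Or.inr ⟨hwj, fun i hi => hlow i (by omega)⟩
      have hres := ih (k + 1) (V ++ pvStepB words V F) (pvStepB words V F) hV' hnxt (by omega) (by omega)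
      rw [← hres]
      norm_num

-- ===== VERDICT (by name: the statement is the Claim_ definition above) =====
theorem solution_spec : Claim_equal_solution := by
  unfold Claim_equal_solution
  intro begin target words _ hpre
  unfold Spec_solution solution solution_alt
  by_cases hmem : target ∈ words
  · rw [if_neg (by simpa using hmem), if_neg (by simpa using hmem)]
    obtain ⟨hbt, hw, k, hk, hkmem⟩ := hpre hmem
    have hex : ∃ m, target ∈ pvLevels begin words m := ⟨k + 1, hkmem⟩
    have hdmem : target ∈ pvLevels begin words (Nat.find hex) := Nat.find_spec hex
    have hdmin : ∀ j < Nat.find hex, target ∉ pvLevels begin words j :=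
      fun j hj => Nat.find_min hex hj
    have hd0 : Nat.find hex ≠ 0 := by
      intro h
      rw [h] at hdmem
      simp only [pvLevels, List.mem_singleton] at hdmem
      exact hbt hdmem.symm
    have hdle : Nat.find hex ≤ k + 1 := Nat.find_min' hex hkmem
    have hA := loopA_eq begin target words hw (Nat.find hex) hdmem hdmin words.length 0 [begin]
      (by intro w; simp [pvLevels]) (by omega) (by omega)
    have hB := loopB_eq begin target words (Nat.find hex) hdmem hdmin (words.length + 1) 0 [begin] [begin]
      (by intro w; constructor
          · rintro h; exact ⟨0, le_refl _, by simpa [pvLevels] using h⟩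
          · rintro ⟨j, hj, hmemj⟩
            have : j = 0 := by omega
            subst this; simpa [pvLevels] using hmemj)
      (by intro w; simp [pvLevels]) (by omega) (by omega)
    norm_num at hA hB
    rw [hA, hB]
  · rw [if_pos (by simpa using hmem), if_pos (by simpa using hmem)]
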